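-- pv_equiv track=rewrite | github.com/poeschko/iCAT-Analytics | icdexplorer/icd/models.py | get_heatmap_status
-- ===== SOURCE A (Python) =====
-- def get_heatmap_status(heatmap_feature):
--     colors = ["h_blackblue", "h_darkestblue", "h_darkblue", "h_blue", "h_yellow", "h_orange", "h_red"]
--     limits = [356, 180, 30, 14, 7, 3]
--
--     for idx, limit in enumerate(limits):
--         if heatmap_feature < limit:
--             continue
--         else:
--             return colors[idx]
--     # return hottest
--     return colors[-1]
-- ===== SOURCE B (Python) =====
-- import bisect
--
-- ASC_LIMITS = [3, 7, 14, 30, 180, 356]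
-- REV_COLORS = ["h_red", "h_orange", "h_yellow", "h_blue", "h_darkblue", "h_darkestblue", "h_blackblue"]
--
-- def get_heatmap_status(heatmap_feature):
--     return REV_COLORS[bisect.bisect_right(ASC_LIMITS, heatmap_feature)]
-- ===== Notes on version B (the rewrite author's own statement) =====
-- stated objective: idiomatic
-- what changed: Replaces the sequential scan over descending limits with early return by a single bisect_right binary-search lookup into an ascending threshold table indexing a reversed color list.
import Mathlib
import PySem

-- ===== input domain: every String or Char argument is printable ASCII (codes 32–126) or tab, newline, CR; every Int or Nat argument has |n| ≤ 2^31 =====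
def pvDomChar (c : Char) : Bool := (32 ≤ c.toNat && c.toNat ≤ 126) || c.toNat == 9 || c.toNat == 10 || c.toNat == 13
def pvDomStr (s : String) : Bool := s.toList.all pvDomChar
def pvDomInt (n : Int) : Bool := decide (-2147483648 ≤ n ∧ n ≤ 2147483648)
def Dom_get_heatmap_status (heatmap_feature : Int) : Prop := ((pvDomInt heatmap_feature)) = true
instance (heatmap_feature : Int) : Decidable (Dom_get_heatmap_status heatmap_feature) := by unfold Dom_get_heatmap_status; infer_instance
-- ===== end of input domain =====

-- B replaces A's sequential descending-threshold scan with a bisect_right binary search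
-- into an ascending threshold table (idiomatic; return value equivalence proved below).


-- ===== PORT A =====
def pvColorsA : List String := ["h_blackblue", "h_darkestblue", "h_darkblue", "h_blue", "h_yellow", "h_orange", "h_red"]

-- the for-loop over enumerate(limits): continue on x < limit, else return colors[idx]
def pvALoop (x : Int) : List (Int × Int) → Option String
  | [] => none
  | (idx, limit) :: rest =>
    if x < limit then pvALoop x rest
    else some (PySem.List.pyGetD pvColorsA idx "")  -- colors[idx]

def get_heatmap_status (heatmap_feature : Int) : String :=
  let limits : List Int := [356, 180, 30, 14, 7, 3]
  match pvALoop heatmap_feature (PySem.List.enumerate limits) with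
  | some s => s
  | none => PySem.List.pyGetD pvColorsA (-1) ""  -- colors[-1]

-- ===== PORT B =====
def pvAscLimits : List Int := [3, 7, 14, 30, 180, 356]
def pvRevColors : List String := ["h_red", "h_orange", "h_yellow", "h_blue", "h_darkblue", "h_darkestblue", "h_blackblue"]

-- CPython bisect.bisect_right, step for step (lo/hi binary search)
def pvBisectRight (a : List Int) (x : Int) (lo hi : Nat) : Nat :=
  if h : lo < hi then
    let mid := (lo + hi) / 2
    if x < a.getD mid 0 then pvBisectRight a x lo mid
    else pvBisectRight a x (mid + 1) hi
  else lo
termination_by hi - lo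
decreasing_by all_goals omega

def get_heatmap_status_alt (heatmap_feature : Int) : String :=
  pvRevColors.getD (pvBisectRight pvAscLimits heatmap_feature 0 pvAscLimits.length) ""

-- ===== PRECONDITION & SPEC =====
def Spec_get_heatmap_status (heatmap_feature : Int) (out : String) : Prop := out = get_heatmap_status_alt heatmap_feature
instance (heatmap_feature : Int) (out : String) : Decidable (Spec_get_heatmap_status heatmap_feature out) := by unfold Spec_get_heatmap_status; infer_instance

-- ===== CLAIM (what is proved, stated in full; the proofs are below) =====
def Claim_equal_get_heatmap_status : Prop := ∀ (heatmap_feature : Int), Dom_get_heatmap_status heatmap_feature → Spec_get_heatmap_status heatmap_feature (get_heatmap_status heatmap_feature)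

-- ===== LEMMAS AND PROOFS =====

-- ===== VERDICT (by name: the statement is the Claim_ definition above) =====
theorem get_heatmap_status_spec : Claim_equal_get_heatmap_status := by
  intro x _
  unfold Spec_get_heatmap_status get_heatmap_status get_heatmap_status_alt
  have hb : pvBisectRight pvAscLimits x 0 pvAscLimits.length =
      (if x < 30 then if x < 7 then if x < 3 then 0 else 1 else if x < 14 then 2 else 3
       else if x < 356 then if x < 180 then 4 else 5 else 6) := by
    simp [pvBisectRight, pvAscLimits]
  rw [hb]
  simp only [pvALoop, PySem.List.enumerate_cons, PySem.List.enumerate_nil]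
  norm_num
  split_ifs <;> simp_all [pvColorsA, pvRevColors, PySem.List.pyGetD, PySem.List.pyGet?, PySem.List.pyIdx?] <;> omega
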